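-- pv_equiv track=rewrite | github.com/ayoubzulfiqar/Leeteration | MinimumTotalOperations/minimum_total_operations.py | minimum_total_operations
-- ===== SOURCE A (Python) =====
-- def minimum_total_operations(nums: list[int]) -> int:
--     if not nums:
--         return 0
--
--     nums.sort()
--     n = len(nums)
--
--     median = nums[(n - 1) // 2]
--
--     total_operations = 0
--     for num in nums:
--         total_operations += abs(num - median)
--
--     return total_operations
-- ===== SOURCE B (Python) =====
-- def minimum_total_operations(nums: list[int]) -> int:
--     # Quickselect (iterative, middle-element pivot) finds the lower median
--     # without sorting; then one pass sums the absolute differences.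
--     # Note: A sorts nums in place; B leaves nums unmodified (return values coincide).
--     if not nums:
--         return 0
--     k = (len(nums) - 1) // 2
--     l = nums
--     while True:
--         p = l[len(l) // 2]
--         lows = [x for x in l if x < p]
--         if k < len(lows):
--             l = lows
--             continue
--         cnt = l.count(p)
--         if k < len(lows) + cnt:
--             m = p
--             break
--         k -= len(lows) + cnt
--         l = [x for x in l if x > p]
--     return sum(abs(x - m) for x in nums)
-- ===== Notes on version B (the rewrite author's own statement) =====
-- stated objective: alternative
-- what changed: Replaces sort-then-index with an iterative quickselect (middle-element pivot, three-way partition) that finds the lower median without sorting, followed by a single pass summing absolute differences over the unsorted input; A sorts nums in place while B leaves it unmodified (return values coincide).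
import Mathlib
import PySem

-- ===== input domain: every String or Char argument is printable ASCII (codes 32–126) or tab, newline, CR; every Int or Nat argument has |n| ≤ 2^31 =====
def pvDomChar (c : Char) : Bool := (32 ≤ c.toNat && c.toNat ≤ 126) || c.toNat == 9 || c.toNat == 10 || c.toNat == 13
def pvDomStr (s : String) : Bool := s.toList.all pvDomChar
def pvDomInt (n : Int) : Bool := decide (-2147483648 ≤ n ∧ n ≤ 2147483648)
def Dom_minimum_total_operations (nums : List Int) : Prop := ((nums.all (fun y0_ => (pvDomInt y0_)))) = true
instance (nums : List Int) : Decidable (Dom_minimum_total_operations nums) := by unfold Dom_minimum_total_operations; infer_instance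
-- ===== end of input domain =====

-- B replaces A's sort-then-index by an iterative quickselect (middle pivot, three-way
-- partition) for the lower median plus one pass of abs-differences over the unsorted input;
-- A sorts nums in place (mutation), B does not — the equivalence is about the return value.

-- ===== PORT A =====
def minimum_total_operations (nums : List Int) : Int :=
  if nums = [] then 0
  else
    let s := PySem.List.sorted nums (fun x => x) false
    let n : Int := s.length
    -- index (n-1)//2 is always in range here (s nonempty), so getD 0 is never taken
    let median := (PySem.List.pyGet? s (PySem.Int.floordiv (n - 1) 2)).getD 0
    s.foldl (fun acc num => acc + |num - median|) 0

-- ===== PORT B =====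
-- the while-loop of Source B as a tail recursion on (l, k); l[len(l)//2] is in range (l nonempty)
def pvSelect : List Int → Nat → Int
  | [], _ => 0
  | x :: xs, k =>
    let p := (x :: xs)[(x :: xs).length / 2]'(Nat.div_lt_self (by simp) (by norm_num))
    let lows := (x :: xs).filter (fun y => decide (y < p))
    if k < lows.length then pvSelect lows k
    else
      let cnt := (x :: xs).count p
      if k < lows.length + cnt then p
      else pvSelect ((x :: xs).filter (fun y => decide (p < y))) (k - (lows.length + cnt))
termination_by l _ => l.length
decreasing_by
  · exact List.length_filter_lt_length_iff_exists.mpr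
      ⟨p, List.getElem_mem _, fun h => absurd (of_decide_eq_true h) (lt_irrefl p)⟩
  · exact List.length_filter_lt_length_iff_exists.mpr
      ⟨p, List.getElem_mem _, fun h => absurd (of_decide_eq_true h) (lt_irrefl p)⟩

def minimum_total_operations_alt (nums : List Int) : Int :=
  if nums = [] then 0
  else
    let k := (nums.length - 1) / 2   -- Python (len(nums)-1)//2: Nat division is exact here
    let m := pvSelect nums k
    (nums.map (fun x => |x - m|)).sum

-- ===== PRECONDITION & SPEC =====
def Spec_minimum_total_operations (nums : List Int) (out : Int) : Prop := out = minimum_total_operations_alt nums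
instance (nums : List Int) (out : Int) : Decidable (Spec_minimum_total_operations nums out) := by unfold Spec_minimum_total_operations; infer_instance

-- ===== CLAIM (what is proved, stated in full; the proofs are below) =====
def Claim_equal_minimum_total_operations : Prop := ∀ (nums : List Int), Dom_minimum_total_operations nums → Spec_minimum_total_operations nums (minimum_total_operations nums)

-- ===== LEMMAS AND PROOFS =====

-- the three-way partition of l at p, reassembled in order, is a permutation of l
theorem pv_partition_perm (l : List Int) (p : Int) :
    (l.filter (fun y => decide (y < p)) ++
      (List.replicate (l.count p) p ++ l.filter (fun y => decide (p < y)))).Perm l := by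
  have h1 := List.filter_append_perm (fun y => decide (y < p)) l
  have h2 := List.filter_append_perm (fun y => y == p) (l.filter (fun y => !decide (y < p)))
  have he : (l.filter (fun y => !decide (y < p))).filter (fun y => y == p)
      = List.replicate (l.count p) p := by
    rw [List.filter_filter]
    rw [show (fun y => (y == p) && !decide (y < p)) = (fun y => y == p) from ?_,
        List.filter_beq]
    funext y
    by_cases hy : y = p <;> simp [hy]
  have hg : (l.filter (fun y => !decide (y < p))).filter (fun y => !(y == p))
      = l.filter (fun y => decide (p < y)) := by
    rw [List.filter_filter]
    apply List.filter_congr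
    intro y _
    by_cases h1 : y = p
    · simp [h1]
    · by_cases h2 : y < p
      · simp [h2]
        omega
      · have hpy : p < y := lt_of_le_of_ne (not_lt.mp h2) (Ne.symm h1)
        simp [h1, h2, hpy]
  rw [he, hg] at h2
  exact (((h2.append_left (l.filter (fun y => decide (y < p))))).trans h1)

-- quickselect returns the k-th element of the sorted list
theorem pvSelect_sorted : ∀ (n : Nat) (l : List Int), l.length ≤ n → ∀ (k : Nat), k < l.length →
    pvSelect l k = (PySem.List.sorted l (fun x => x) false).getD k 0 := by
  intro n
  induction n with
  | zero => intro l hl k hk; omega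
  | succ n ih =>
    intro l hl k hk
    match l with
    | [] => simp at hk
    | x :: xs =>
      set l := x :: xs with hldef
      have hlen : 0 < l.length := by simp [hldef]
      set p := l[l.length / 2]'(Nat.div_lt_self hlen (by norm_num)) with hp
      have hpm : p ∈ l := List.getElem_mem _
      set lows := l.filter (fun y => decide (y < p)) with hlows
      set highs := l.filter (fun y => decide (p < y)) with hhighs
      set cnt := l.count p with hcnt
      have hcnt1 : 1 ≤ cnt := List.count_pos_iff.mpr hpm
      have hperm := pv_partition_perm l p
      have hlsum : lows.length + (cnt + highs.length) = l.length := by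
        have := hperm.length_eq
        simpa using this
      -- the reassembled partition is sorted
      set S := PySem.List.sorted lows (fun x => x) false ++
        (List.replicate cnt p ++ PySem.List.sorted highs (fun x => x) false) with hS
      have hSperm : S.Perm l := by
        apply List.Perm.trans _ hperm
        exact (PySem.List.sorted_perm lows (fun x => x) false).append
          ((List.Perm.refl _).append (PySem.List.sorted_perm highs (fun x => x) false))
      have hSpair : S.Pairwise (· ≤ ·) := by
        rw [hS]
        apply List.pairwise_append.mpr
        refine ⟨PySem.List.sorted_pairwise lows (fun x => x), ?_, ?_⟩
        · apply List.pairwise_append.mpr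
          refine ⟨List.pairwise_replicate.mpr (by simp), PySem.List.sorted_pairwise highs (fun x => x), ?_⟩
          intro a ha b hb
          have ha' : a = p := List.eq_of_mem_replicate ha
          have hb' : b ∈ highs := (PySem.List.mem_sorted _ _ _ _).mp hb
          have := List.of_mem_filter hb'
          simp at this; omega
        · intro a ha b hb
          have ha' : a ∈ lows := (PySem.List.mem_sorted _ _ _ _).mp ha
          have haa := List.of_mem_filter ha'
          simp at haa
          rcases List.mem_append.mp hb with hb | hb
          · have := List.eq_of_mem_replicate hb; omega
          · have hb' : b ∈ highs := (PySem.List.mem_sorted _ _ _ _).mp hb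
            have := List.of_mem_filter hb'
            simp at this; omega
      have hSeq : PySem.List.sorted l (fun x => x) false = S :=
        PySem.List.sorted_id_eq_of_perm_of_pairwise l S hSperm hSpair
      have hlenlows : (PySem.List.sorted lows (fun x => x) false).length = lows.length :=
        PySem.List.length_sorted lows _ _
      have hlenhighs : (PySem.List.sorted highs (fun x => x) false).length = highs.length :=
        PySem.List.length_sorted highs _ _
      have hlowlt : lows.length < l.length :=
        List.length_filter_lt_length_iff_exists.mpr ⟨p, hpm, by simp⟩
      have hhighlt : highs.length < l.length :=
        List.length_filter_lt_length_iff_exists.mpr ⟨p, hpm, by simp⟩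
      rw [hSeq]
      show pvSelect (x :: xs) k = S.getD k 0
      rw [pvSelect]
      simp only [← hldef, ← hp, ← hlows, ← hcnt]
      by_cases h1 : k < lows.length
      · rw [if_pos h1]
        have := ih lows (by omega) k h1
        rw [this, hS, List.getD_eq_getElem?_getD, List.getD_eq_getElem?_getD,
            List.getElem?_append_left (by omega)]
      · rw [if_neg h1]
        by_cases h2 : k < lows.length + cnt
        · rw [if_pos h2]
          rw [hS, List.getD_eq_getElem?_getD,
              List.getElem?_append_right (by omega),
              List.getElem?_append_left (by simp; omega)]
          rw [List.getElem?_replicate]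
          simp only [hlenlows]
          rw [if_pos (by omega)]
          rfl
        · rw [if_neg h2]
          have hk' : k - (lows.length + cnt) < highs.length := by omega
          have := ih highs (by omega) _ hk'
          rw [← hhighs, this, hS, List.getD_eq_getElem?_getD, List.getD_eq_getElem?_getD,
              List.getElem?_append_right (by omega),
              List.getElem?_append_right (by simp; omega)]
          congr 2
          simp [hlenlows]
          omega

-- ===== VERDICT (by name: the statement is the Claim_ definition above) =====
theorem minimum_total_operations_spec : Claim_equal_minimum_total_operations := by
  intro nums _
  unfold Spec_minimum_total_operations minimum_total_operations minimum_total_operations_alt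
  by_cases hnil : nums = []
  · simp [hnil]
  · simp only [if_neg hnil]
    set s := PySem.List.sorted nums (fun x => x) false with hs
    have hperm : s.Perm nums := PySem.List.sorted_perm nums _ _
    have hlen : s.length = nums.length := hperm.length_eq
    have hpos : 0 < nums.length := List.length_pos_iff.mpr hnil
    set k := (nums.length - 1) / 2 with hk
    have hkn : k < nums.length := by omega
    -- A's index (n-1)//2 equals k
    have hidx : PySem.Int.floordiv ((s.length : Int) - 1) 2 = (k : Int) := by
      have h1 : ((s.length : Int) - 1) = ((nums.length - 1 : Nat) : Int) := by omega
      rw [h1, PySem.Int.floordiv_eq_ediv_of_pos (by omega)]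
      omega
    have hget : PySem.List.pyGet? s (k : Int) = some (s.getD k 0) := by
      rw [PySem.List.pyGet?_natCast, List.getElem?_eq_getElem (by omega),
          List.getD_eq_getElem s 0 (by omega)]
    have hm : pvSelect nums k = s.getD k 0 :=
      pvSelect_sorted nums.length nums le_rfl k hkn
    simp only [hidx, hget, Option.getD_some, ← hm]
    rw [PySem.List.foldl_add s (fun num => |num - pvSelect nums k|) 0, zero_add]
    exact List.Perm.sum_eq (hperm.map _)
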